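-- pv_equiv track=rewrite | github.com/MrBrantCode/unitest_baseline | mut_generate/mist_train_cf/cf_88585/solution.py | sort_strings
-- ===== SOURCE A (Python) =====
-- def sort_strings(list_of_strings):
--     # Remove duplicates
--     unique_strings = list(set(list_of_strings))
--
--     # Sort using merge sort
--     def merge_sort(strings):
--         if len(strings) <= 1:
--             return strings
--
--         mid = len(strings) // 2
--         left_half = strings[:mid]
--         right_half = strings[mid:]
--
--         sorted_left = merge_sort(left_half)
--         sorted_right = merge_sort(right_half)
--
--         return merge(sorted_left, sorted_right)
--
--     def merge(left, right):
--         merged = []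
--         i = j = 0
--
--         while i < len(left) and j < len(right):
--             if left[i] < right[j]:
--                 merged.append(left[i])
--                 i += 1
--             else:
--                 merged.append(right[j])
--                 j += 1
--
--         while i < len(left):
--             merged.append(left[i])
--             i += 1
--
--         while j < len(right):
--             merged.append(right[j])
--             j += 1
--
--         return merged
--
--     sorted_strings = merge_sort(unique_strings)
--
--     # Move special characters to the end
--     sorted_strings = [s for s in sorted_strings if not s.isalpha()] + [s for s in sorted_strings if s.isalpha()]
--
--     return sorted_strings
-- ===== SOURCE B (Python) =====
-- def sort_strings(list_of_strings):
--     # One keyed sort: non-alpha strings (isalpha()==False) sort before alpha ones,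
--     # each group ascending -- exactly A's sort-then-stable-partition result.
--     return sorted(set(list_of_strings), key=lambda s: (s.isalpha(), s))
-- ===== Notes on version B (the rewrite author's own statement) =====
-- stated objective: simpler
-- what changed: Replaced dedup + hand-written recursive merge sort + two filtering passes by a single builtin sorted() over the set with the tuple key (s.isalpha(), s), whose first component performs the non-alpha/alpha partition and whose second orders each group.
import Mathlib
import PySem

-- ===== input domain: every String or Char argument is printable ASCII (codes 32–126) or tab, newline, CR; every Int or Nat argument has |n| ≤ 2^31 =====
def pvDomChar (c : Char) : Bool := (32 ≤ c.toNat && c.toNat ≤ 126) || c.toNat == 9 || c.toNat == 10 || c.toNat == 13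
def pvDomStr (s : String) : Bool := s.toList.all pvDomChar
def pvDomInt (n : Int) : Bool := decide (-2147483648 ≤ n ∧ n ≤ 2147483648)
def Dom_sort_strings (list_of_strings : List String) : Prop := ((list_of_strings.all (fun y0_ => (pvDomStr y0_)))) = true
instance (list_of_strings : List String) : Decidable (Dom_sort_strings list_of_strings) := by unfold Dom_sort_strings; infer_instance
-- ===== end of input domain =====

-- B replaces A's dedup + recursive merge sort + two filtering passes by one keyed sort
-- (key = (isalpha, s)); objective: simpler.


-- ===== PORT A =====
-- inner helper 'merge': the three while loops over indices i, j, as structural recursion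
def pvMergeA : List String → List String → List String
  | [], right => right                      -- first loop over, drain right
  | left, [] => left                        -- first loop over, drain left
  | a :: l, b :: r =>
      if a < b then a :: pvMergeA l (b :: r)
      else b :: pvMergeA (a :: l) r

-- inner helper 'merge_sort'
def pvMergeSortA (strings : List String) : List String :=
  if strings.length ≤ 1 then strings
  else
    let mid := strings.length / 2           -- len(strings) // 2 (nonneg: Nat division)
    let left_half := strings.take mid       -- strings[:mid]
    let right_half := strings.drop mid      -- strings[mid:]
    pvMergeA (pvMergeSortA left_half) (pvMergeSortA right_half)
termination_by strings.length
decreasing_by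
  · simp only [List.length_take]; omega
  · simp only [List.length_drop]; omega

def sort_strings (list_of_strings : List String) : List String :=
  let unique_strings := PySem.Set.ofList list_of_strings   -- list(set(...)); consumed order-independently
  let sorted_strings := pvMergeSortA unique_strings
  sorted_strings.filter (fun s => !(PySem.Str.strIsalpha s))
    ++ sorted_strings.filter (fun s => PySem.Str.strIsalpha s)

-- ===== PORT B =====
def sort_strings_alt (list_of_strings : List String) : List String :=
  PySem.List.sorted2 (PySem.Set.ofList list_of_strings)
    (fun s => PySem.Str.strIsalpha s) (fun s => s)

-- ===== PRECONDITION & SPEC =====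
def Spec_sort_strings (list_of_strings : List String) (out : List String) : Prop := out = sort_strings_alt list_of_strings
instance (list_of_strings : List String) (out : List String) : Decidable (Spec_sort_strings list_of_strings out) := by unfold Spec_sort_strings; infer_instance

-- ===== CLAIM (what is proved, stated in full; the proofs are below) =====
def Claim_equal_sort_strings : Prop := ∀ (list_of_strings : List String), Dom_sort_strings list_of_strings → Spec_sort_strings list_of_strings (sort_strings list_of_strings)

-- ===== LEMMAS AND PROOFS =====

theorem pvMergeA_perm (l r : List String) : (pvMergeA l r).Perm (l ++ r) := by
  fun_induction pvMergeA l r with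
  | case1 r => simp
  | case2 l h => simp
  | case3 a l b r hab ih => simpa using ih.cons a
  | case4 a l b r hab ih => exact (ih.cons b).trans List.perm_middle.symm

theorem pvMergeA_pairwise (l r : List String)
    (hl : l.Pairwise (· ≤ ·)) (hr : r.Pairwise (· ≤ ·)) :
    (pvMergeA l r).Pairwise (· ≤ ·) := by
  fun_induction pvMergeA l r with
  | case1 r => exact hr
  | case2 l h => exact hl
  | case3 a l b r hab ih =>
      refine List.Pairwise.cons ?_ (ih hl.tail hr)
      intro x hx
      have hx' : x ∈ l ++ (b :: r) := (pvMergeA_perm l (b :: r)).mem_iff.mp hx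
      rcases List.mem_append.mp hx' with h1 | h2
      · exact List.rel_of_pairwise_cons hl h1
      · rcases List.mem_cons.mp h2 with rfl | h3
        · exact le_of_lt hab
        · exact (le_of_lt hab).trans (List.rel_of_pairwise_cons hr h3)
  | case4 a l b r hab ih =>
      refine List.Pairwise.cons ?_ (ih hl hr.tail)
      intro x hx
      have hba : b ≤ a := not_lt.mp hab
      have hx' : x ∈ (a :: l) ++ r := (pvMergeA_perm (a :: l) r).mem_iff.mp hx
      rcases List.mem_append.mp hx' with h1 | h2
      · rcases List.mem_cons.mp h1 with rfl | h3
        · exact hba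
        · exact hba.trans (List.rel_of_pairwise_cons hl h3)
      · exact List.rel_of_pairwise_cons hr h2

theorem pvMergeSortA_perm (l : List String) : (pvMergeSortA l).Perm l := by
  fun_induction pvMergeSortA l with
  | case1 l h => exact List.Perm.refl l
  | case2 l h mid lh rh ih1 ih2 =>
      exact ((pvMergeA_perm _ _).trans (ih1.append ih2)).trans (by simp [lh, rh, mid])

theorem pvMergeSortA_pairwise (l : List String) : (pvMergeSortA l).Pairwise (· ≤ ·) := by
  fun_induction pvMergeSortA l with
  | case1 l h =>
      match l, h with
      | [], _ => simp
      | [a], _ => simp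
  | case2 l h mid lh rh ih1 ih2 => exact pvMergeA_pairwise _ _ ih1 ih2

-- PySem.List.sorted2 is PySem.List.sorted with the lexicographic pair key
theorem sorted2_eq_sorted_lex (xs : List String) (k1 : String → Bool) :
    PySem.List.sorted2 xs k1 (fun s => s) false
      = PySem.List.sorted xs (fun s => toLex (k1 s, s)) false := by
  have hbef : (fun a b : String => decide (k1 a < k1 b) || (!decide (k1 b < k1 a) && decide (a < b)))
      = (fun a b : String => decide (toLex (k1 a, a) < toLex (k1 b, b))) := by
    funext a b
    rw [Bool.eq_iff_iff]
    simp only [Bool.or_eq_true, Bool.and_eq_true, Bool.not_eq_true', decide_eq_true_eq,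
      decide_eq_false_iff_not, Prod.Lex.lt_iff]
    cases k1 a <;> cases k1 b <;> simp
  unfold PySem.List.sorted2 PySem.List.sorted
  simp only [if_neg Bool.false_ne_true]
  rw [hbef]

theorem sort_strings_eq (xs : List String) :
    sort_strings xs = sort_strings_alt xs := by
  unfold sort_strings sort_strings_alt
  set al := fun s : String => PySem.Str.strIsalpha s with hal
  set u := PySem.Set.ofList xs with hu
  set S := pvMergeSortA u with hS
  set P := S.filter (fun s => !(al s)) ++ S.filter (fun s => al s) with hP
  have hSperm : S.Perm u := pvMergeSortA_perm u
  have hSnd : S.Nodup := (hSperm.nodup_iff).mpr (PySem.Set.nodup_ofList xs)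
  have hSlt : S.Pairwise (· < ·) :=
    ((pvMergeSortA_pairwise u).and hSnd).imp (fun h => lt_of_le_of_ne h.1 h.2)
  have hperm : P.Perm u := by
    have h1 := List.filter_append_perm (fun s => !(al s)) S
    simp only [Bool.not_not] at h1
    exact h1.trans hSperm
  have mem1 : ∀ {a : String}, a ∈ S.filter (fun s => !(al s)) → al a = false := by
    intro a ha; simpa using (List.mem_filter.mp ha).2
  have mem2 : ∀ {a : String}, a ∈ S.filter (fun s => al s) → al a = true := by
    intro a ha; exact (List.mem_filter.mp ha).2
  have hpw : P.Pairwise (fun a b => toLex (al a, a) < toLex (al b, b)) := by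
    rw [hP, List.pairwise_append]
    refine ⟨?_, ?_, ?_⟩
    · exact (hSlt.filter _).imp_of_mem (fun ha hb hlt =>
        Prod.Lex.lt_iff.mpr (Or.inr ⟨by simp [mem1 ha, mem1 hb], hlt⟩))
    · exact (hSlt.filter _).imp_of_mem (fun ha hb hlt =>
        Prod.Lex.lt_iff.mpr (Or.inr ⟨by simp [mem2 ha, mem2 hb], hlt⟩))
    · intro a ha b hb
      refine Prod.Lex.lt_iff.mpr (Or.inl ?_)
      simp [mem1 ha, mem2 hb]
  rw [sorted2_eq_sorted_lex]
  exact (PySem.List.sorted_eq_of_perm_of_pairwise_lt u P _ hperm hpw).symm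

-- ===== VERDICT (by name: the statement is the Claim_ definition above) =====
theorem sort_strings_spec : Claim_equal_sort_strings := by
  intro xs _
  exact sort_strings_eq xs
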